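-- pv_equiv track=rewrite | github.com/Agentomics/BioAgentics | src/bioagentics/data/nsclc_depmap.py | classify_kras_allele
-- ===== SOURCE A (Python) =====
-- KRAS_ALLELE_MAP = {
--     "p.G12C": "G12C",
--     "p.G12D": "G12D",
--     "p.G12V": "G12V",
--     "p.G12A": "G12_other",
--     "p.G12F": "G12_other",
--     "p.G12R": "G12_other",
--     "p.G12S": "G12_other",
--     "p.G13C": "G13",
--     "p.G13D": "G13",
--     "p.Q61H": "Q61",
--     "p.Q61K": "Q61",
--     "p.Q61L": "Q61",
-- }
--
-- def classify_kras_allele(protein_changes: list[str]) -> str: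
--     """Classify KRAS allele type from a list of protein changes for one cell line."""
--     hotspot_alleles = []
--     for pc in protein_changes:
--         allele = KRAS_ALLELE_MAP.get(pc)
--         if allele:
--             hotspot_alleles.append(allele)
--
--     if not hotspot_alleles:
--         return "other" if protein_changes else "WT"
--
--     # If multiple hotspot mutations, take the most common canonical one
--     for preferred in ["G12C", "G12D", "G12V"]:
--         if preferred in hotspot_alleles:
--             return preferred
--     return hotspot_alleles[0]
-- ===== SOURCE B (Python) =====
-- KRAS_ALLELE_MAP = {
--     "p.G12C": "G12C",
--     "p.G12D": "G12D",
--     "p.G12V": "G12V",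
--     "p.G12A": "G12_other",
--     "p.G12F": "G12_other",
--     "p.G12R": "G12_other",
--     "p.G12S": "G12_other",
--     "p.G13C": "G13",
--     "p.G13D": "G13",
--     "p.Q61H": "Q61",
--     "p.Q61K": "Q61",
--     "p.Q61L": "Q61",
-- }
--
-- _RANK = {"G12C": 0, "G12D": 1, "G12V": 2}
--
-- def classify_kras_allele(protein_changes: list[str]) -> str:
--     """Single pass: keep the running minimum-rank hotspot allele (first occurrence wins ties)."""
--     best_rank = 4
--     best_allele = None
--     for pc in protein_changes:
--         allele = KRAS_ALLELE_MAP.get(pc)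
--         if allele:
--             r = _RANK.get(allele, 3)
--             if r < best_rank:
--                 best_rank = r
--                 best_allele = allele
--     if best_allele is None:
--         return "other" if protein_changes else "WT"
--     return best_allele
-- ===== Notes on version B (the rewrite author's own statement) =====
-- stated objective: simpler
-- what changed: A builds a list of mapped alleles and then scans it three times for preferred alleles; B makes a single pass keeping the running minimum-rank hotspot allele (first occurrence wins ties), so no intermediate list and no re-scans.
import Mathlib
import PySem

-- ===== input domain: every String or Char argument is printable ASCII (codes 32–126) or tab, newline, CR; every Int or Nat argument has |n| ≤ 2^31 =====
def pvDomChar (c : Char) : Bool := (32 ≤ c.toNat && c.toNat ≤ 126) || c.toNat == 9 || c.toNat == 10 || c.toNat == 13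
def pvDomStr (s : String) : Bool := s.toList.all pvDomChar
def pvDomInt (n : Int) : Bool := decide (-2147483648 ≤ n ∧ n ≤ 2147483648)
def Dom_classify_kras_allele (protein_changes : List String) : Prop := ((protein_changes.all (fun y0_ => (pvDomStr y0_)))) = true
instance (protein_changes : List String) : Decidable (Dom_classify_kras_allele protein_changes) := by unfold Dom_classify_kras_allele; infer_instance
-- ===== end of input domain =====

-- B replaces A's build-a-list-then-three-membership-scans with a single pass that keeps the
-- running minimum-rank hotspot allele (objective: simpler one-pass decomposition; same cost class).

-- ===== PORT A =====
def krasAlleleMap : PySem.Dict String String :=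
  PySem.Dict.ofList [("p.G12C","G12C"),("p.G12D","G12D"),("p.G12V","G12V"),
    ("p.G12A","G12_other"),("p.G12F","G12_other"),("p.G12R","G12_other"),("p.G12S","G12_other"),
    ("p.G13C","G13"),("p.G13D","G13"),
    ("p.Q61H","Q61"),("p.Q61K","Q61"),("p.Q61L","Q61")]

-- loop body of A's first for-loop ('if allele:' = allele is not None and nonempty)
def krasStepA (acc : List String) (pc : String) : List String :=
  match krasAlleleMap.get? pc with
  | some allele => if allele ≠ "" then acc ++ [allele] else acc
  | none => acc

-- A's 'for preferred in [...]' loop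
def krasPickPreferred (hs : List String) : List String → String
  | [] => hs.headD ""          -- hotspot_alleles[0]; A's guard ensures hs ≠ [] here
  | p :: ps => if hs.contains p then p else krasPickPreferred hs ps

def classify_kras_allele (protein_changes : List String) : String :=
  let hotspot_alleles := protein_changes.foldl krasStepA []
  if hotspot_alleles = [] then
    (if protein_changes ≠ [] then "other" else "WT")
  else
    krasPickPreferred hotspot_alleles ["G12C", "G12D", "G12V"]

-- ===== PORT B =====
def krasRank : PySem.Dict String Int := PySem.Dict.ofList [("G12C",0),("G12D",1),("G12V",2)]

-- loop body of B's single pass: state = (best_rank, best_allele)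
def krasStepB (st : Int × Option String) (pc : String) : Int × Option String :=
  match krasAlleleMap.get? pc with
  | some allele =>
      if allele ≠ "" then
        let r := krasRank.getD allele 3
        if r < st.1 then (r, some allele) else st
      else st
  | none => st

def classify_kras_allele_alt (protein_changes : List String) : String :=
  let st := protein_changes.foldl krasStepB (4, none)
  match st.2 with
  | none => if protein_changes ≠ [] then "other" else "WT"
  | some a => a

-- ===== PRECONDITION & SPEC =====
def Spec_classify_kras_allele (protein_changes : List String) (out : String) : Prop := out = classify_kras_allele_alt protein_changes
instance (protein_changes : List String) (out : String) : Decidable (Spec_classify_kras_allele protein_changes out) := by unfold Spec_classify_kras_allele; infer_instance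

-- ===== CLAIM (what is proved, stated in full; the proofs are below) =====
def Claim_equal_classify_kras_allele : Prop := ∀ (protein_changes : List String), Dom_classify_kras_allele protein_changes → Spec_classify_kras_allele protein_changes (classify_kras_allele protein_changes)

-- ===== LEMMAS AND PROOFS =====

-- the preferred-pick on the list side: what A's second loop computes on a nonempty hs
def krasPick (hs : List String) : String :=
  if hs.contains "G12C" then "G12C"
  else if hs.contains "G12D" then "G12D"
  else if hs.contains "G12V" then "G12V"
  else hs.headD ""

lemma krasPickPreferred_eq (hs : List String) :
    krasPickPreferred hs ["G12C", "G12D", "G12V"] = krasPick hs := by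
  simp [krasPickPreferred, krasPick]

-- every value of the allele map is one of six literals
set_option maxHeartbeats 2000000 in
set_option maxRecDepth 8192 in
lemma krasMap_values (pc a : String) (h : krasAlleleMap.get? pc = some a) :
    a = "G12C" ∨ a = "G12D" ∨ a = "G12V" ∨ a = "G12_other" ∨ a = "G13" ∨ a = "Q61" := by
  have e : krasAlleleMap = PySem.Dict.mk [("p.G12C","G12C"),("p.G12D","G12D"),("p.G12V","G12V"),
    ("p.G12A","G12_other"),("p.G12F","G12_other"),("p.G12R","G12_other"),("p.G12S","G12_other"),
    ("p.G13C","G13"),("p.G13D","G13"),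
    ("p.Q61H","Q61"),("p.Q61K","Q61"),("p.Q61L","Q61")] := by decide
  rw [e] at h
  clear e
  simp only [PySem.Dict.get?, Option.map_eq_some_iff] at h
  obtain ⟨p, hp, hv⟩ := h
  have hm := List.mem_of_find?_eq_some hp
  simp only [List.mem_cons, List.not_mem_nil, or_false] at hm
  rcases hm with h|h|h|h|h|h|h|h|h|h|h|h <;> subst h <;> simp only at hv <;> subst hv <;> tauto

lemma krasRank_notin (b : String) (h1 : b ≠ "G12C") (h2 : b ≠ "G12D") (h3 : b ≠ "G12V") :
    krasRank.getD b 3 = 3 := by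
  have e : krasRank = PySem.Dict.mk [("G12C",0),("G12D",1),("G12V",2)] := by decide
  rw [e]
  have e1 : ("G12C" == b) = false := by simp [Ne.symm h1]
  have e2 : ("G12D" == b) = false := by simp [Ne.symm h2]
  have e3 : ("G12V" == b) = false := by simp [Ne.symm h3]
  simp [PySem.Dict.getD, PySem.Dict.get?, List.find?, e1, e2, e3]

lemma kras_headD_mem (hs : List String) (h : hs ≠ []) : hs.headD "" ∈ hs := by
  cases hs <;> simp_all

-- coupling invariant between A's accumulated list and B's (best_rank, best_allele)
def krasInv (hs : List String) (st : Int × Option String) : Prop :=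
  (hs = [] ∧ st = (4, none)) ∨
  (hs ≠ [] ∧ st = (krasRank.getD (krasPick hs) 3, some (krasPick hs)))

lemma kras_headD_append (hs : List String) (a : String) (h : hs ≠ []) :
    (hs ++ [a]).headD "" = hs.headD "" := by
  cases hs <;> simp_all

lemma krasPick_rank_notin (hs : List String) (h1 : hs ≠ []) (c1 : "G12C" ∉ hs)
    (c2 : "G12D" ∉ hs) (c3 : "G12V" ∉ hs) : krasRank.getD (krasPick hs) 3 = 3 := by
  have hb : krasPick hs = hs.headD "" := by simp [krasPick, c1, c2, c3]
  have hmem := kras_headD_mem hs h1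
  rw [hb]
  refine krasRank_notin _ (fun he => ?_) (fun he => ?_) (fun he => ?_) <;> rw [he] at hmem
  · exact c1 hmem
  · exact c2 hmem
  · exact c3 hmem

lemma kras_head_getD (hs : List String) (h : hs ≠ []) (d : String) :
    hs.head?.getD d = hs.head?.getD "" := by cases hs <;> simp_all

lemma krasRank0 : krasRank.getD "G12C" 3 = 0 := by decide
lemma krasRank1 : krasRank.getD "G12D" 3 = 1 := by decide
lemma krasRank2 : krasRank.getD "G12V" 3 = 2 := by decide
lemma krasRank3 : krasRank.getD "G12_other" 3 = 3 := by decide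
lemma krasRank4 : krasRank.getD "G13" 3 = 3 := by decide
lemma krasRank5 : krasRank.getD "Q61" 3 = 3 := by decide

lemma krasStep_inv (hs : List String) (st : Int × Option String) (pc : String)
    (h : krasInv hs st) : krasInv (krasStepA hs pc) (krasStepB st pc) := by
  unfold krasStepA krasStepB
  cases hg : krasAlleleMap.get? pc with
  | none => exact h
  | some allele =>
    have hv := krasMap_values pc allele hg
    have hne : allele ≠ "" := by rcases hv with h'|h'|h'|h'|h'|h' <;> subst h' <;> decide
    simp only [hne, ne_eq, not_false_iff, if_pos]
    rcases h with ⟨h1, h2⟩ | ⟨h1, h2⟩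
    · subst h1; subst h2
      right
      rcases hv with h'|h'|h'|h'|h'|h' <;> subst h' <;> exact ⟨by simp, by decide⟩
    · subst h2
      right
      refine ⟨by simp [h1], ?_⟩
      by_cases c1 : "G12C" ∈ hs <;> by_cases c2 : "G12D" ∈ hs <;>
        by_cases c3 : "G12V" ∈ hs <;>
        (try have hr := krasPick_rank_notin hs h1 c1 c2 c3) <;>
        rcases hv with h'|h'|h'|h'|h'|h' <;> subst h' <;>
        simp_all [krasPick, kras_headD_append _ _ h1, kras_head_getD _ h1,
          krasRank0, krasRank1, krasRank2, krasRank3, krasRank4, krasRank5] <;> omega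

lemma krasLoop_inv (pcs : List String) (hs : List String) (st : Int × Option String)
    (h : krasInv hs st) : krasInv (pcs.foldl krasStepA hs) (pcs.foldl krasStepB st) := by
  induction pcs generalizing hs st with
  | nil => exact h
  | cons pc rest ih => exact ih _ _ (krasStep_inv hs st pc h)

-- ===== VERDICT (by name: the statement is the Claim_ definition above) =====
theorem classify_kras_allele_spec : Claim_equal_classify_kras_allele := by
  intro pcs _
  unfold Spec_classify_kras_allele classify_kras_allele classify_kras_allele_alt
  have h := krasLoop_inv pcs [] (4, none) (Or.inl ⟨rfl, rfl⟩)
  rcases h with ⟨h1, h2⟩ | ⟨h1, h2⟩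
  · simp [h1, h2]
  · simp [h1, h2, krasPickPreferred_eq]
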